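-- pv_equiv track=rewrite | github.com/mrsxman/asadshakx_sh | massiv.py | k_seriyaning_oxirgi_ornini_almashtirish
-- ===== SOURCE A (Python) =====
-- def k_seriyaning_oxirgi_ornini_almashtirish(massiv, k):
--     n = len(massiv)
--     new_massiv = []
--
--     for i in range(n):
--         if i % 2 == 0 and massiv[i] <= k:
--             # Juft indekslilarni K - seriyasi bilan oxirgi seriyasi ornini almashtirish uchun boshqarish
--             if i < n - 1 and massiv[i] > massiv[i + 1]:
--                 new_massiv.append(massiv[i + 1])
--             else:
--                 new_massiv.append(massiv[i])
--         else:
--             # Toq indekslilarni boshqa seriyalarga qo'shish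
--             new_massiv.append(massiv[i])
--
--     return new_massiv
-- ===== SOURCE B (Python) =====
-- def k_seriyaning_oxirgi_ornini_almashtirish(massiv, k):
--     # pairwise decomposition: consume the list two elements at a time,
--     # emitting both elements of the pair per step; a lone trailing element
--     # (odd length) is emitted unchanged
--     out = []
--     i = 0
--     n = len(massiv)
--     while i + 1 < n:
--         a, b = massiv[i], massiv[i + 1]
--         out.append(b if a <= k and a > b else a)
--         out.append(b)
--         i += 2
--     if i < n:
--         out.append(massiv[i])
--     return out
-- ===== Notes on version B (the rewrite author's own statement) =====
-- stated objective: alternative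
-- what changed: Replaced the per-index loop over range(n) with mod-2 tests and branch-dependent single appends by a pairwise pass that consumes the list two elements at a time, emitting both elements of each pair per step (plus a lone trailing element), with no parity test.
import Mathlib
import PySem

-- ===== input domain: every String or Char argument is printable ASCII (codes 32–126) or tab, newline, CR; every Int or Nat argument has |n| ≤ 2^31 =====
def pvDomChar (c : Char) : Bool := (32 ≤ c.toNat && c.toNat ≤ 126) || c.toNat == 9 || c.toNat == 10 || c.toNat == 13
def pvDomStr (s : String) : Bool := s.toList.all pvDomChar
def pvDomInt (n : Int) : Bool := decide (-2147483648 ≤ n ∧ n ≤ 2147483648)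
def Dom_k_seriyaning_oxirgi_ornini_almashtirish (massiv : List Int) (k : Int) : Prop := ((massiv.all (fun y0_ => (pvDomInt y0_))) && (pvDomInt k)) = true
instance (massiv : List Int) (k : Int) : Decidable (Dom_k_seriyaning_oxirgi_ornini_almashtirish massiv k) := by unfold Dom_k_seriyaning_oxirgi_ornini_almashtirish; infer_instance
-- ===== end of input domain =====

-- B replaces A's index loop (mod-2 test + branch-dependent appends) by a pairwise pass
-- consuming two elements at a time (ported as pair recursion); objective: alternative decomposition.

-- ===== PORT A =====
-- every index massiv[i] / massiv[i+1] accessed is in range (i comes from range(n),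
-- and massiv[i+1] only under i < n-1), so pyGetD with default 0 is exact here
def k_seriyaning_oxirgi_ornini_almashtirish (massiv : List Int) (k : Int) : List Int :=
  let n : Int := massiv.length
  (PySem.List.pyRange 0 n 1).foldl (fun new_massiv i =>
    if i % 2 = 0 ∧ PySem.List.pyGetD massiv i 0 ≤ k then
      if i < n - 1 ∧ PySem.List.pyGetD massiv i 0 > PySem.List.pyGetD massiv (i + 1) 0 then
        new_massiv ++ [PySem.List.pyGetD massiv (i + 1) 0]
      else
        new_massiv ++ [PySem.List.pyGetD massiv i 0]
    else
      new_massiv ++ [PySem.List.pyGetD massiv i 0]) []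

-- ===== PORT B =====
def k_seriyaning_oxirgi_ornini_almashtirish_alt (massiv : List Int) (k : Int) : List Int :=
  match massiv with
  | [] => []
  | [a] => [a]
  | a :: b :: rest =>
      (if a ≤ k ∧ a > b then b else a) :: b :: k_seriyaning_oxirgi_ornini_almashtirish_alt rest k

-- ===== PRECONDITION & SPEC =====
def Spec_k_seriyaning_oxirgi_ornini_almashtirish (massiv : List Int) (k : Int) (out : List Int) : Prop := out = k_seriyaning_oxirgi_ornini_almashtirish_alt massiv k
instance (massiv : List Int) (k : Int) (out : List Int) : Decidable (Spec_k_seriyaning_oxirgi_ornini_almashtirish massiv k out) := by unfold Spec_k_seriyaning_oxirgi_ornini_almashtirish; infer_instance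

-- ===== CLAIM (what is proved, stated in full; the proofs are below) =====
def Claim_equal_k_seriyaning_oxirgi_ornini_almashtirish : Prop := ∀ (massiv : List Int) (k : Int), Dom_k_seriyaning_oxirgi_ornini_almashtirish massiv k → Spec_k_seriyaning_oxirgi_ornini_almashtirish massiv k (k_seriyaning_oxirgi_ornini_almashtirish massiv k)

-- ===== LEMMAS AND PROOFS =====

-- the per-index value A appends
def pvBody (massiv : List Int) (k : Int) (i : Int) : Int :=
  if i % 2 = 0 ∧ PySem.List.pyGetD massiv i 0 ≤ k then
    if i < (massiv.length : Int) - 1 ∧ PySem.List.pyGetD massiv i 0 > PySem.List.pyGetD massiv (i + 1) 0 then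
      PySem.List.pyGetD massiv (i + 1) 0
    else
      PySem.List.pyGetD massiv i 0
  else
    PySem.List.pyGetD massiv i 0

lemma portA_eq_map (massiv : List Int) (k : Int) :
    k_seriyaning_oxirgi_ornini_almashtirish massiv k
      = (PySem.List.pyRange 0 (massiv.length : Int) 1).map (pvBody massiv k) := by
  unfold k_seriyaning_oxirgi_ornini_almashtirish
  have h := PySem.List.foldl_append_singleton_eq_map
    (l := PySem.List.pyRange 0 (massiv.length : Int) 1)
    (f := pvBody massiv k) (acc := [])
  simp only [List.nil_append] at h
  rw [← h]
  apply PySem.List.foldl_congr_mem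
  intro acc i _
  unfold pvBody
  split_ifs <;> rfl

lemma altLength (massiv : List Int) (k : Int) :
    (k_seriyaning_oxirgi_ornini_almashtirish_alt massiv k).length = massiv.length := by
  fun_induction k_seriyaning_oxirgi_ornini_almashtirish_alt massiv k <;> simp_all

lemma altGet (massiv : List Int) (k : Int) (j : Nat) (hj : j < massiv.length) :
    (k_seriyaning_oxirgi_ornini_almashtirish_alt massiv k).getD j 0
      = if j % 2 = 0 ∧ massiv.getD j 0 ≤ k ∧ j + 1 < massiv.length ∧ massiv.getD j 0 > massiv.getD (j + 1) 0
        then massiv.getD (j + 1) 0 else massiv.getD j 0 := by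
  fun_induction k_seriyaning_oxirgi_ornini_almashtirish_alt massiv k generalizing j with
  | case1 => simp at hj
  | case2 a =>
      have h0 : j = 0 := by simp at hj; omega
      subst h0; simp
  | case3 a b rest ih =>
      match j with
      | 0 => by_cases h : a ≤ k ∧ a > b <;> simp [h]
      | 1 => by_cases h : a ≤ k ∧ a > b <;> simp [h]
      | (j + 2) =>
          have hj' : j < rest.length := by simpa using hj
          have := ih j hj'
          have hmod : (j + 2) % 2 = j % 2 := by omega
          by_cases h : a ≤ k ∧ a > b <;>
            simpa [h, hmod, Nat.add_lt_add_iff_right] using this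

lemma pvBody_eq (massiv : List Int) (k : Int) (j : Nat) (hj : j < massiv.length) :
    pvBody massiv k (j : Int)
      = if j % 2 = 0 ∧ massiv.getD j 0 ≤ k ∧ j + 1 < massiv.length ∧ massiv.getD j 0 > massiv.getD (j + 1) 0
        then massiv.getD (j + 1) 0 else massiv.getD j 0 := by
  unfold pvBody
  have h1 : PySem.List.pyGetD massiv (j : Int) 0 = massiv.getD j 0 :=
    PySem.List.pyGetD_natCast massiv j 0
  have h2 : PySem.List.pyGetD massiv ((j : Int) + 1) 0 = massiv.getD (j + 1) 0 := by
    have : ((j : Int) + 1) = ((j + 1 : Nat) : Int) := by push_cast; ring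
    rw [this, PySem.List.pyGetD_natCast]
  have hmod : ((j : Int) % 2 = 0) ↔ (j % 2 = 0) := by omega
  have hlt : ((j : Int) < (massiv.length : Int) - 1) ↔ (j + 1 < massiv.length) := by omega
  rw [h1, h2]
  simp only [hmod, hlt]
  split_ifs <;> first | rfl | tauto

-- ===== VERDICT (by name: the statement is the Claim_ definition above) =====
theorem k_seriyaning_oxirgi_ornini_almashtirish_spec : Claim_equal_k_seriyaning_oxirgi_ornini_almashtirish := by
  intro massiv k _
  unfold Spec_k_seriyaning_oxirgi_ornini_almashtirish
  rw [portA_eq_map]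
  apply List.ext_getElem
  · simp [altLength, PySem.List.length_pyRange_one]
  · intro j hj1 hj2
    have hjlen : j < massiv.length := by
      simpa [PySem.List.length_pyRange_one] using hj1
    have hrange : (PySem.List.pyRange 0 (massiv.length : Int) 1)[j]'(by
        simpa [PySem.List.length_pyRange_one] using hjlen) = (j : Int) := by
      rw [PySem.List.getElem_pyRange_one]; ring
    have hgetD : ∀ (l : List Int) (h : j < l.length), l[j]'h = l.getD j 0 := by
      intro l h; simp [List.getD, List.getElem?_eq_getElem h]
    rw [List.getElem_map, hrange, hgetD _ hj2, pvBody_eq massiv k j hjlen,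
        altGet massiv k j hjlen]
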